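-- pv_equiv track=rewrite | github.com/jaschon/leetcode_solutions | solutions/014_longpre.py | lcp_b
-- ===== SOURCE A (Python) =====
-- from collections import Counter
--
-- def lcp_b(strs):
--     if not strs: return "NONE"
--     parts = []
--     for s in strs:
--         pre = ""
--         for ch in s:
--             pre += ch
--             if len(pre) > 1:
--                 parts.append(pre)
--     return Counter(parts).most_common(1)[0][0] \
--             if Counter(parts).most_common(1)[0][1] > 1 else "NONE"
-- ===== SOURCE B (Python) =====
-- def lcp_b(strs):
--     counts = {}
--     for s in strs:
--         for j in range(2, len(s) + 1):
--             p = s[:j]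
--             counts[p] = counts.get(p, 0) + 1
--     best = max(counts.items(), key=lambda kv: kv[1], default=None)
--     return best[0] if best is not None and best[1] > 1 else "NONE"
-- ===== Notes on version B (the rewrite author's own statement) =====
-- stated objective: alternative
-- what changed: B increments a single insertion-ordered dict of prefix counts directly (via slices) and takes the first maximum with max(), instead of materialising the full list of all prefixes and building a Counter twice; the intermediate parts list disappears.
-- crash fix: On a nonempty list whose strings all have length < 2, A raises IndexError (most_common(1)[0] on an empty Counter) while B returns "NONE". — e.g. on lcp_b(["a", ""]): A raises IndexError, B returns "NONE"
import Mathlib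
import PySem

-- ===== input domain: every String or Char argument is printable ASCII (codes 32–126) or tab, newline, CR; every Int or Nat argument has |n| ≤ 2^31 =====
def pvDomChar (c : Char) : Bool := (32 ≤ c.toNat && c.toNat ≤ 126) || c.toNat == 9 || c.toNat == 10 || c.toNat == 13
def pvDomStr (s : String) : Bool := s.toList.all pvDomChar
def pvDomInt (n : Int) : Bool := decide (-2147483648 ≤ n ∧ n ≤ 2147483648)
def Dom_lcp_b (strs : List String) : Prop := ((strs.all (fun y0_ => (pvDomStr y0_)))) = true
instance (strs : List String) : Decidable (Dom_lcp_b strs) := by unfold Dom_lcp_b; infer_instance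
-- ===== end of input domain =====

-- B builds one insertion-ordered prefix-count dict directly and takes the first maximum, skipping A's
-- intermediate list of all prefixes and its double Counter construction.

-- ===== PORT A =====
-- parts accumulation: for s in strs: pre=""; for ch in s: pre+=ch; if len(pre)>1: parts.append(pre)
def lcp_b (strs : List String) : String :=
  if strs = [] then "NONE" else
    let parts : List (List Char) := strs.foldl (fun parts s =>
      (s.toList.foldl (fun (st : List Char × List (List Char)) ch =>
        let pre := st.1 ++ [ch]
        (pre, if pre.length > 1 then st.2 ++ [pre] else st.2)) ([], parts)).2) []
    -- Counter(parts).most_common(1)[0]: first item with maximal count (heapq.nlargest is stable);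
    -- none = IndexError on an empty Counter, excluded by Pre_
    match PySem.List.max? (PySem.Dict.counter parts).items (fun kv => kv.2) with
    | some (k, c) => if c > 1 then String.ofList k else "NONE"
    | none => "NONE"

-- ===== PORT B =====
def lcp_b_alt (strs : List String) : String :=
  let counts : PySem.Dict (List Char) Int := strs.foldl (fun d s =>
    (PySem.List.pyRange 2 ((s.toList.length : Int) + 1) 1).foldl (fun d j =>
      let p := PySem.List.slice s.toList none (some j)
      d.insert p (d.getD p 0 + 1)) d) PySem.Dict.empty
  -- max(counts.items(), key=count, default=None): first item with maximal count
  match PySem.List.max? counts.items (fun kv => kv.2) with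
  | some (k, c) => if c > 1 then String.ofList k else "NONE"
  | none => "NONE"

-- ===== PRECONDITION & SPEC =====
-- Pre_ excludes exactly the inputs where Python A raises IndexError: a nonempty list all of whose
-- strings are shorter than 2 (the Counter is empty, most_common(1)[0] fails).
def Pre_lcp_b (strs : List String) : Prop :=
  strs = [] ∨ ∃ s ∈ strs, 2 ≤ s.toList.length
instance (strs : List String) : Decidable (Pre_lcp_b strs) := by unfold Pre_lcp_b; infer_instance
def pvWitness_lcp_b : List String := ["ab", "ab", "ac"]

-- On a nonempty list whose strings all have length < 2, A raises IndexError while B returns "NONE".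
def Raises_lcp_b (strs : List String) : Prop :=
  strs ≠ [] ∧ ∀ s ∈ strs, s.toList.length < 2
instance (strs : List String) : Decidable (Raises_lcp_b strs) := by unfold Raises_lcp_b; infer_instance
def pvRaiseWitness_lcp_b : List String := ["a", ""]
def pvRaiseWitnessOut_lcp_b : String := "NONE"

def Spec_lcp_b (strs : List String) (out : String) : Prop := out = lcp_b_alt strs
instance (strs : List String) (out : String) : Decidable (Spec_lcp_b strs out) := by unfold Spec_lcp_b; infer_instance

-- ===== CLAIM (what is proved, stated in full; the proofs are below) =====
def Claim_equal_lcp_b : Prop := ∀ (strs : List String), Dom_lcp_b strs → Pre_lcp_b strs → Spec_lcp_b strs (lcp_b strs)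
def Claim_raises_lcp_b : Prop := (∀ (strs : List String), Dom_lcp_b strs → Raises_lcp_b strs → ¬ Pre_lcp_b strs) ∧ (Dom_lcp_b (pvRaiseWitness_lcp_b) ∧ Raises_lcp_b (pvRaiseWitness_lcp_b) ∧ lcp_b_alt (pvRaiseWitness_lcp_b) = pvRaiseWitnessOut_lcp_b)

-- ===== LEMMAS AND PROOFS =====

-- the prefixes (length ≥ 2) of a string, as A generates them
def pvAux (p : List Char) : List Char → List (List Char)
  | [] => []
  | c :: cs => (if (p ++ [c]).length > 1 then [p ++ [c]] else []) ++ pvAux (p ++ [c]) cs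

lemma pvAux_inner (cs : List Char) : ∀ (p : List Char) (acc : List (List Char)),
    cs.foldl (fun (st : List Char × List (List Char)) ch =>
      let pre := st.1 ++ [ch]
      (pre, if pre.length > 1 then st.2 ++ [pre] else st.2)) (p, acc)
      = (p ++ cs, acc ++ pvAux p cs) := by
  induction cs with
  | nil => intro p acc; simp [pvAux]
  | cons c cs ih =>
    intro p acc
    simp only [List.foldl_cons, pvAux, ih]
    split_ifs <;> simp

lemma pvAux_spec (cs : List Char) : ∀ (p : List Char), 1 ≤ p.length →
    pvAux p cs = (List.range cs.length).map (fun k => p ++ cs.take (k + 1)) := by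
  induction cs with
  | nil => intro p _; simp [pvAux]
  | cons c cs ih =>
    intro p hp
    have h2 : (p ++ [c]).length > 1 := by simp; omega
    simp only [pvAux, if_pos h2, List.length_cons, List.range_succ_eq_map]
    rw [ih (p ++ [c]) (by simp)]
    simp [List.map_map, Function.comp, List.take_succ_cons, List.append_assoc]

lemma pvAux_nil (cs : List Char) :
    pvAux [] cs = (List.range (cs.length - 1)).map (fun k => cs.take (k + 2)) := by
  cases cs with
  | nil => simp [pvAux]
  | cons c cs =>
    simp only [pvAux, List.nil_append, List.length_singleton]
    rw [pvAux_spec cs [c] (by simp)]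
    simp [List.take_succ_cons]

-- B's inner range-fold inserts exactly A's prefixes, in order
lemma pvRange_map (cs : List Char) :
    (PySem.List.pyRange 2 ((cs.length : Int) + 1) 1).map
      (fun j => PySem.List.slice cs none (some j)) = pvAux [] cs := by
  rw [pvAux_nil, PySem.List.pyRange_one]
  have hlen : (((cs.length : Int) + 1) - 2).toNat = cs.length - 1 := by omega
  rw [hlen, List.map_map]
  apply List.map_congr_left
  intro k hk
  simp only [Function.comp]
  have h2 : (2 : Int) + (k : Int) = ((k + 2 : Nat) : Int) := by push_cast; ring
  rw [h2, PySem.List.slice_to_natCast]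

-- counting a concatenation string-by-string = counting the concatenated parts list
lemma pvFold_concat (ins : PySem.Dict (List Char) Int → List Char → PySem.Dict (List Char) Int)
    (strs : List String) : ∀ (acc : List (List Char)) (d : PySem.Dict (List Char) Int),
    (strs.foldl (fun a s => a ++ pvAux [] s.toList) acc).foldl ins d
      = strs.foldl (fun d s => (pvAux [] s.toList).foldl ins d) (acc.foldl ins d) := by
  induction strs with
  | nil => intro acc d; simp
  | cons s strs ih =>
    intro acc d
    simp only [List.foldl_cons, ih, List.foldl_append]

lemma pvCounts_eq (strs : List String) :
    (strs.foldl (fun d s =>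
      (PySem.List.pyRange 2 ((s.toList.length : Int) + 1) 1).foldl (fun d j =>
        let p := PySem.List.slice s.toList none (some j)
        d.insert p (d.getD p 0 + 1)) d) PySem.Dict.empty)
    = PySem.Dict.counter (strs.foldl (fun parts s =>
      (s.toList.foldl (fun (st : List Char × List (List Char)) ch =>
        let pre := st.1 ++ [ch]
        (pre, if pre.length > 1 then st.2 ++ [pre] else st.2)) ([], parts)).2) []) := by
  rw [← PySem.Dict.foldl_insert_getD_add_one_eq_counter]
  have hparts : (strs.foldl (fun parts s =>
      (s.toList.foldl (fun (st : List Char × List (List Char)) ch =>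
        let pre := st.1 ++ [ch]
        (pre, if pre.length > 1 then st.2 ++ [pre] else st.2)) ([], parts)).2) [])
      = strs.foldl (fun a s => a ++ pvAux [] s.toList) [] := by
    apply PySem.List.foldl_congr_mem
    intro acc s _
    rw [pvAux_inner]
  rw [hparts, pvFold_concat (fun d p => d.insert p (d.getD p 0 + 1)) strs [] PySem.Dict.empty]
  simp only [List.foldl_nil]
  apply PySem.List.foldl_congr_mem
  intro d s _
  rw [← pvRange_map, List.foldl_map]

-- ===== VERDICT (by name: the statement is the Claim_ definition above) =====
theorem lcp_b_raises : Claim_raises_lcp_b := by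
  unfold Claim_raises_lcp_b
  refine ⟨?_, by decide⟩
  rintro strs _ ⟨hne, hall⟩ (h | ⟨s, hs, h2⟩)
  · exact hne h
  · exact absurd h2 (by have := hall s hs; omega)

theorem lcp_b_spec : Claim_equal_lcp_b := by
  have _raisesUsed := lcp_b_raises
  intro strs _ _
  unfold Spec_lcp_b lcp_b lcp_b_alt
  rw [pvCounts_eq]
  by_cases h : strs = []
  · subst h; decide
  · rw [if_neg h]
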